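-- pv_equiv track=rewrite | github.com/Vochi-dev/v3 | reboot.py | parse_sip_peers
-- ===== SOURCE A (Python) =====
-- def parse_sip_peers(output: str) -> dict:
--     lines = output.strip().split('\n')
--     gsm_total = gsm_online = sip_total = sip_online = internal_total = internal_online = 0
--     for line in lines:
--         if 'Name/username' in line or 'sip peers' in line or not line.strip():
--             continue
--         parts = line.split()
--         if len(parts) < 6:
--             continue
--         name_part = parts[0]
--         peer_name = name_part.split('/')[0]
--         is_online = " OK " in line
--         if peer_name.startswith('000') and len(peer_name) == 7:
--             gsm_total += 1
--             if is_online: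
--                 gsm_online += 1
--         elif len(peer_name) == 3 and peer_name.isdigit():
--             if peer_name not in ['301', '302']:
--                 internal_total += 1
--                 if is_online:
--                     internal_online += 1
--         elif peer_name not in ['301', '302']:
--             sip_total += 1
--             if is_online:
--                 sip_online += 1
--     return {
--         'gsm_total': gsm_total,
--         'gsm_online': gsm_online,
--         'sip_total': sip_total,
--         'sip_online': sip_online,
--         'internal_total': internal_total,
--         'internal_online': internal_online
--     }
-- ===== SOURCE B (Python) =====
-- def parse_sip_peers(output: str) -> dict:
--     # table-then-count decomposition: one scan builds (peer_name, is_online) records,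
--     # then six independent counting passes with self-contained category predicates
--     records = []
--     for line in output.strip().split('\n'):
--         if 'Name/username' in line or 'sip peers' in line or not line.strip():
--             continue
--         parts = line.split()
--         if len(parts) < 6:
--             continue
--         records.append((parts[0].split('/')[0], ' OK ' in line))
--
--     def gsm(n):
--         return n.startswith('000') and len(n) == 7
--
--     def internal(n):
--         return (not gsm(n)) and len(n) == 3 and n.isdigit() and n not in ('301', '302')
--
--     def sip(n):
--         return (not gsm(n)) and not (len(n) == 3 and n.isdigit()) and n not in ('301', '302')
--
--     return {
--         'gsm_total': sum(1 for n, _ in records if gsm(n)),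
--         'gsm_online': sum(1 for n, o in records if gsm(n) and o),
--         'sip_total': sum(1 for n, _ in records if sip(n)),
--         'sip_online': sum(1 for n, o in records if sip(n) and o),
--         'internal_total': sum(1 for n, _ in records if internal(n)),
--         'internal_online': sum(1 for n, o in records if internal(n) and o),
--     }
-- ===== Notes on version B (the rewrite author's own statement) =====
-- stated objective: alternative
-- what changed: Replaced the single interleaved six-accumulator loop with a table-then-count decomposition: one pass extracts (peer_name, is_online) records, then each of the six counts is an independent counting pass whose predicate encodes the branch precedence (gsm over internal over sip) explicitly.
import Mathlib
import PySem

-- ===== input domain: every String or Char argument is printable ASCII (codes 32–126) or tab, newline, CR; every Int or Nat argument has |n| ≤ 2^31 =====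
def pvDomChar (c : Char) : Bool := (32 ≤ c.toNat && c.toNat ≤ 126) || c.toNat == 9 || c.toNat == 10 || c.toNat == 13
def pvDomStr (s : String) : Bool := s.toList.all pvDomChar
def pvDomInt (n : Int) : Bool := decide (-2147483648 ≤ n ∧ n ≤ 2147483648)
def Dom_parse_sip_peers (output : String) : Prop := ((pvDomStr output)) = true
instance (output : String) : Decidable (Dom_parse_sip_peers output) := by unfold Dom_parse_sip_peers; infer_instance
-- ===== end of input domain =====

-- B replaces A's single interleaved six-accumulator loop by a record-table pass followed by six
-- independent counting passes (alternative decomposition, same cost).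


-- ===== PORT A =====
-- loop body of A: six running counters updated in branch order
def pvStepA (st : Int × Int × Int × Int × Int × Int) (line : String) :
    Int × Int × Int × Int × Int × Int :=
  if PySem.Str.isIn "Name/username" line || PySem.Str.isIn "sip peers" line
      || PySem.Str.len (PySem.Str.strip line) == 0 then st
  else
    let parts := PySem.Str.split₀ line
    if parts.length < 6 then st
    else
      let name_part := PySem.List.pyGetD parts 0 ""
      let peer_name := PySem.List.pyGetD ((PySem.Str.split? name_part "/").getD []) 0 ""
      let is_online := PySem.Str.isIn " OK " line
      let (gt, go, spt, spo, it, io) := st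
      if PySem.Str.startswith peer_name "000" && PySem.Str.len peer_name == 7 then
        (gt + 1, if is_online then go + 1 else go, spt, spo, it, io)
      else if PySem.Str.len peer_name == 3 && PySem.Str.strIsdigit peer_name then
        if !(peer_name == "301" || peer_name == "302") then
          (gt, go, spt, spo, it + 1, if is_online then io + 1 else io)
        else (gt, go, spt, spo, it, io)
      else if !(peer_name == "301" || peer_name == "302") then
        (gt, go, spt + 1, if is_online then spo + 1 else spo, it, io)
      else (gt, go, spt, spo, it, io)

def parse_sip_peers (output : String) : List (String × Int) :=
  let lines := (PySem.Str.split? (PySem.Str.strip output) "\n").getD []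
  let r := lines.foldl pvStepA (0, 0, 0, 0, 0, 0)
  [("gsm_total", r.1), ("gsm_online", r.2.1), ("sip_total", r.2.2.1),
   ("sip_online", r.2.2.2.1), ("internal_total", r.2.2.2.2.1), ("internal_online", r.2.2.2.2.2)]

-- ===== PORT B =====
-- B first builds the table of valid (peer_name, is_online) records …
def pvClassify (line : String) : Option (String × Bool) :=
  if PySem.Str.isIn "Name/username" line || PySem.Str.isIn "sip peers" line
      || PySem.Str.len (PySem.Str.strip line) == 0 then none
  else
    let parts := PySem.Str.split₀ line
    if parts.length < 6 then none
    else
      some (PySem.List.pyGetD ((PySem.Str.split? (PySem.List.pyGetD parts 0 "") "/").getD []) 0 "",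
            PySem.Str.isIn " OK " line)

-- … then counts each category with a self-contained predicate encoding branch precedence
def pvGsm (n : String) : Bool :=
  PySem.Str.startswith n "000" && PySem.Str.len n == 7
def pvInternal (n : String) : Bool :=
  !pvGsm n && (PySem.Str.len n == 3 && PySem.Str.strIsdigit n) && !(n == "301" || n == "302")
def pvSip (n : String) : Bool :=
  !pvGsm n && !(PySem.Str.len n == 3 && PySem.Str.strIsdigit n) && !(n == "301" || n == "302")

def parse_sip_peers_alt (output : String) : List (String × Int) :=
  let records := ((PySem.Str.split? (PySem.Str.strip output) "\n").getD []).filterMap pvClassify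
  [("gsm_total", (records.countP (fun r => pvGsm r.1) : Int)),
   ("gsm_online", (records.countP (fun r => pvGsm r.1 && r.2) : Int)),
   ("sip_total", (records.countP (fun r => pvSip r.1) : Int)),
   ("sip_online", (records.countP (fun r => pvSip r.1 && r.2) : Int)),
   ("internal_total", (records.countP (fun r => pvInternal r.1) : Int)),
   ("internal_online", (records.countP (fun r => pvInternal r.1 && r.2) : Int))]

-- ===== PRECONDITION & SPEC =====
def Spec_parse_sip_peers (output : String) (out : List (String × Int)) : Prop := out = parse_sip_peers_alt output
instance (output : String) (out : List (String × Int)) : Decidable (Spec_parse_sip_peers output out) := by unfold Spec_parse_sip_peers; infer_instance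

-- ===== CLAIM (what is proved, stated in full; the proofs are below) =====
def Claim_equal_parse_sip_peers : Prop := ∀ (output : String), Dom_parse_sip_peers output → Spec_parse_sip_peers output (parse_sip_peers output)

-- ===== LEMMAS AND PROOFS =====
-- one step of A's loop, phrased through B's record classifier and category predicates
theorem pvStepA_eq_classify (a b c d e f : Int) (l : String) :
    pvStepA (a, b, c, d, e, f) l =
      match pvClassify l with
      | none => (a, b, c, d, e, f)
      | some (n, o) =>
        if pvGsm n then (a + 1, if o then b + 1 else b, c, d, e, f)
        else if pvInternal n then (a, b, c, d, e + 1, if o then f + 1 else f)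
        else if pvSip n then (a, b, c + 1, if o then d + 1 else d, e, f)
        else (a, b, c, d, e, f) := by
  simp only [pvStepA, pvClassify, pvGsm, pvInternal, pvSip]
  generalize (PySem.Str.isIn "Name/username" l || PySem.Str.isIn "sip peers" l
      || PySem.Str.len (PySem.Str.strip l) == 0) = g1
  generalize PySem.Str.split₀ l = ps
  generalize PySem.List.pyGetD ((PySem.Str.split? (PySem.List.pyGetD ps 0 "") "/").getD []) 0 "" = n
  generalize PySem.Str.isIn " OK " l = o
  cases g1
  · by_cases h2 : ps.length < 6
    · simp only [Bool.false_eq_true, if_false, h2, if_true]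
    · simp only [Bool.false_eq_true, if_false, h2]
      set bg := (PySem.Str.startswith n "000" && PySem.Str.len n == 7) with hbg
      set bd := (PySem.Str.len n == 3 && PySem.Str.strIsdigit n) with hbd
      set bm := (n == "301" || n == "302") with hbm
      clear_value bg bd bm
      cases bg <;> cases bd <;> cases bm <;> cases o <;> simp only [← hbg, ← hbd, ← hbm] <;> rfl
  · rfl

-- A's whole loop computes B's six counts, shifted by the initial accumulator values
theorem pvLoop_eq (L : List String) (a b c d e f : Int) :
    L.foldl pvStepA (a, b, c, d, e, f) =
      (a + ((L.filterMap pvClassify).countP (fun r => pvGsm r.1) : Int),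
       b + ((L.filterMap pvClassify).countP (fun r => pvGsm r.1 && r.2) : Int),
       c + ((L.filterMap pvClassify).countP (fun r => pvSip r.1) : Int),
       d + ((L.filterMap pvClassify).countP (fun r => pvSip r.1 && r.2) : Int),
       e + ((L.filterMap pvClassify).countP (fun r => pvInternal r.1) : Int),
       f + ((L.filterMap pvClassify).countP (fun r => pvInternal r.1 && r.2) : Int)) := by
  induction L generalizing a b c d e f with
  | nil => simp
  | cons l L ih =>
    simp only [List.foldl_cons, List.filterMap_cons, pvStepA_eq_classify]
    cases hc : pvClassify l with
    | none => simp only [ih]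
    | some r =>
      obtain ⟨n, o⟩ := r
      by_cases hg : pvGsm n = true
      · have hi : pvInternal n = false := by simp [pvInternal, hg]
        have hs : pvSip n = false := by simp [pvSip, hg]
        cases o <;> simp [hg, hi, hs, ih, Prod.ext_iff] <;> omega
      · by_cases hi : pvInternal n = true
        · have hs : pvSip n = false := by
            revert hi; unfold pvInternal pvSip; intro hi; simp_all
          cases o <;> simp [hg, hi, hs, ih, Prod.ext_iff] <;> omega
        · by_cases hs : pvSip n = true
          · cases o <;> simp [hg, hi, hs, ih, Prod.ext_iff] <;> omega
          · simp only [Bool.not_eq_true] at hg hi hs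
            simp [hg, hi, hs, ih]

-- ===== VERDICT (by name: the statement is the Claim_ definition above) =====
theorem parse_sip_peers_spec : Claim_equal_parse_sip_peers := by
  intro output _
  unfold Spec_parse_sip_peers
  simp only [parse_sip_peers, parse_sip_peers_alt]
  simp only [pvLoop_eq, zero_add]
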